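-- pv_equiv track=rewrite | github.com/sjandro/Python_Projects | turn_matrix.py | turn_array
-- ===== SOURCE A (Python) =====
-- def turn_array(param , shifts):
--     matrix = [[0 for i in range(len(param))] for i in range(len(param))]
--     params_length = len(param)
--     x = 0
--     y = 0
--     start = 0
--     end = len(param) - 1
--     while params_length > 0:
--         size = 1 if params_length == 1 else params_length * 4 - 4
--         params_length -= 2
--         outer_layer = build_squence(param, x, y, start, end, size)
--         matrix = build_matrix(matrix,shift_squence(outer_layer, (shifts * -1)),x,y,start,end)
--         x += 1
--         y += 1
--         start += 1
--         end -= 1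
--
--     return matrix
--
-- def build_squence(matrix, x, y, start, end, parameter):
--     squence = []
--     for i in range(parameter):
--         squence.append(matrix[x][y])
--         if x == start and y < end: y += 1
--         elif y == end and x < end: x += 1
--         elif x == end and y > start: y -= 1
--         elif x > start and y == start: x -= 1
--     return squence
--
-- def shift_squence(squence, n):
--     n = n % len(squence)
--     return squence[n:] + squence[:n]
--
-- def build_matrix(matrix, lst, x, y, start, end):
--     for val in lst:
--         matrix[x][y] = val
--         if x == start and y < end: y += 1
--         elif y == end and x < end: x += 1
--         elif x == end and y > start: y -= 1
--         elif x > start and y == start: x -= 1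
--     return matrix
-- ===== SOURCE B (Python) =====
-- def pos_of(L, b, s, i, j):
--     # ring position of boundary cell (i, j) of the layer [L..b], side length s = b - L > 0
--     if i == L:
--         return j - L
--     elif j == b:
--         return s + (i - L)
--     elif i == b:
--         return 2 * s + (b - j)
--     else:
--         return 3 * s + (b - i)
--
-- def coord_of(L, b, s, q):
--     # boundary cell of the layer [L..b] at ring position q (0 <= q < 4*s)
--     if q <= s:
--         return (L, L + q)
--     elif q <= 2 * s:
--         return (L + (q - s), b)
--     elif q <= 3 * s:
--         return (b, b - (q - 2 * s))
--     else:
--         return (b - (q - 3 * s), L)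
--
-- def cell_value(param, shifts, n, i, j):
--     L = min(i, j, n - 1 - i, n - 1 - j)
--     b = n - 1 - L
--     s = b - L
--     if s == 0:
--         return param[i][j]
--     q = (pos_of(L, b, s, i, j) - shifts) % (4 * s)
--     si, sj = coord_of(L, b, s, q)
--     return param[si][sj]
--
-- def turn_array(param, shifts):
--     n = len(param)
--     return [[cell_value(param, shifts, n, i, j) for j in range(n)] for i in range(n)]
-- ===== Notes on version B (the rewrite author's own statement) =====
-- stated objective: alternative
-- what changed: Replaces A's mutate-in-place scheme (walk each ring with a 4-branch cursor state machine, collect it into a list, rotate the list by slicing, walk the ring again writing it back) with a pure per-cell closed form: each output cell (i,j) directly computes its layer L=min(i,j,n-1-i,n-1-j), its position on that ring, the shifted source position modulo the ring length, and reads the single source cell of param arithmetically - no ring lists, no rotation by slicing, no matrix writes.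
import Mathlib
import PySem

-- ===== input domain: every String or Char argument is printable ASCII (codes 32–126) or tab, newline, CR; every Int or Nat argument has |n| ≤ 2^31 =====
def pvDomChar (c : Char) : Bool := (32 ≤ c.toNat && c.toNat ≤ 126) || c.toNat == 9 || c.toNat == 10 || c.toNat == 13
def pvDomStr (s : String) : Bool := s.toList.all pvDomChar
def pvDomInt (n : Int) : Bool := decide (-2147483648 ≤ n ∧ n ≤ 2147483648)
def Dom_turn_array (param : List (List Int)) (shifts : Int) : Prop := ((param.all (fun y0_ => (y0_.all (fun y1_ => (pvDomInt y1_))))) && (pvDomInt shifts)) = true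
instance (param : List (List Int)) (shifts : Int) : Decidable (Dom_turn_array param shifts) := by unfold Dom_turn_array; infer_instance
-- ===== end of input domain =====

-- B replaces A's mutate-in-place scheme (walk each ring with a 4-branch cursor, collect it,
-- rotate by slicing, walk again writing back) with a pure per-cell closed form: each output
-- cell computes its layer, its ring position, the shifted source position mod the ring length,
-- and reads one cell of param (objective: alternative).

-- matrix[x][y] (read); the indices both programs produce are in range on Pre_ (where Python does not raise)
def pvCell (m : List (List Int)) (x y : Int) : Int :=
  PySem.List.pyGetD (PySem.List.pyGetD m x []) y 0

-- matrix[x][y] = v (write, A only); the indices A produces are always in range of the fresh n×n matrix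
def pvSetCell (m : List (List Int)) (x y v : Int) : List (List Int) :=
  PySem.List.pySetD m x (PySem.List.pySetD (PySem.List.pyGetD m x []) y v)

-- ===== PORT A =====
-- the 4-branch cursor update shared verbatim by A's build_squence and build_matrix
def pvStep (start end_ x y : Int) : Int × Int :=
  if x = start ∧ y < end_ then (x, y + 1)
  else if y = end_ ∧ x < end_ then (x + 1, y)
  else if x = end_ ∧ y > start then (x, y - 1)
  else if x > start ∧ y = start then (x - 1, y)
  else (x, y)

def bsq_go (mtx : List (List Int)) (start end_ : Int) : Nat → List Int → Int → Int → List Int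
  | 0, acc, _, _ => acc
  | n + 1, acc, x, y =>
    let acc' := acc ++ [pvCell mtx x y]
    let p := pvStep start end_ x y
    bsq_go mtx start end_ n acc' p.1 p.2

def build_squence (mtx : List (List Int)) (x y start end_ parameter : Int) : List Int :=
  bsq_go mtx start end_ parameter.toNat [] x y

def shift_squence (squence : List Int) (n : Int) : List Int :=
  let n' := PySem.Int.mod n (PySem.List.len squence)
  PySem.List.slice squence (some n') none ++ PySem.List.slice squence none (some n')

def bm_go (start end_ : Int) : List Int → List (List Int) → Int → Int → List (List Int)
  | [], m, _, _ => m
  | v :: vs, m, x, y =>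
    let m' := pvSetCell m x y v
    let p := pvStep start end_ x y
    bm_go start end_ vs m' p.1 p.2

def build_matrix (m : List (List Int)) (lst : List Int) (x y start end_ : Int) : List (List Int) :=
  bm_go start end_ lst m x y

def turn_loop (param : List (List Int)) (shifts : Int) (matrix : List (List Int))
    (params_length x y start end_ : Int) : List (List Int) :=
  if _h : params_length > 0 then
    let size : Int := if params_length = 1 then 1 else params_length * 4 - 4
    let outer_layer := build_squence param x y start end_ size
    let matrix' := build_matrix matrix (shift_squence outer_layer (shifts * -1)) x y start end_
    turn_loop param shifts matrix' (params_length - 2) (x + 1) (y + 1) (start + 1) (end_ - 1)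
  else matrix
termination_by params_length.toNat
decreasing_by omega

def turn_array (param : List (List Int)) (shifts : Int) : List (List Int) :=
  let n := PySem.List.len param
  let matrix := (PySem.List.pyRange 0 n 1).map (fun _ => (PySem.List.pyRange 0 n 1).map (fun _ => (0 : Int)))
  turn_loop param shifts matrix n 0 0 0 (n - 1)

-- ===== PORT B =====
-- ring position of boundary cell (i, j) of the layer [L..b], side length s = b - L > 0
def posOf (L b s i j : Int) : Int :=
  if i = L then j - L
  else if j = b then s + (i - L)
  else if i = b then 2 * s + (b - j)
  else 3 * s + (b - i)

-- boundary cell of the layer [L..b] at ring position q (0 ≤ q < 4*s)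
def coordOf (L b s q : Int) : Int × Int :=
  if q ≤ s then (L, L + q)
  else if q ≤ 2 * s then (L + (q - s), b)
  else if q ≤ 3 * s then (b, b - (q - 2 * s))
  else (b - (q - 3 * s), L)

def cellValue (param : List (List Int)) (shifts n i j : Int) : Int :=
  let L := min (min (min i j) (n - 1 - i)) (n - 1 - j)
  let b := n - 1 - L
  let s := b - L
  if s = 0 then pvCell param i j
  else
    let q := PySem.Int.mod (posOf L b s i j - shifts) (4 * s)
    let c := coordOf L b s q
    pvCell param c.1 c.2

def turn_array_alt (param : List (List Int)) (shifts : Int) : List (List Int) :=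
  let n := PySem.List.len param
  (PySem.List.pyRange 0 n 1).map (fun i =>
    (PySem.List.pyRange 0 n 1).map (fun j => cellValue param shifts n i j))

-- ===== PRECONDITION & SPEC =====
-- Pre_ excludes exactly the inputs on which A raises IndexError: some row shorter than the
-- number of rows (for n ≥ 2 A reads column n-1 of every row, and row 0 at column n-1 for n = 1).
-- Nothing A returns on is excluded.
def Pre_turn_array (param : List (List Int)) (shifts : Int) : Prop :=
  ∀ r ∈ param, param.length ≤ r.length

instance (param : List (List Int)) (shifts : Int) : Decidable (Pre_turn_array param shifts) := by
  unfold Pre_turn_array; infer_instance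

def pvWitness_turn_array : List (List Int) × Int := ([[1, 2], [3, 4]], 1)

def Spec_turn_array (param : List (List Int)) (shifts : Int) (out : List (List Int)) : Prop := out = turn_array_alt param shifts
instance (param : List (List Int)) (shifts : Int) (out : List (List Int)) : Decidable (Spec_turn_array param shifts out) := by unfold Spec_turn_array; infer_instance

-- ===== CLAIM (what is proved, stated in full; the proofs are below) =====
def Claim_equal_turn_array : Prop := ∀ (param : List (List Int)) (shifts : Int), Dom_turn_array param shifts → Pre_turn_array param shifts → Spec_turn_array param shifts (turn_array param shifts)

-- ===== LEMMAS AND PROOFS =====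

-- ---- the clockwise ring of the layer [s..e], and the ring-based intermediate loop ----
def ringCoords (top bottom : Int) : List (Int × Int) :=
  if top = bottom then [(top, top)]
  else (PySem.List.pyRange top (bottom + 1) 1).map (fun j => (top, j))
    ++ (PySem.List.pyRange (top + 1) (bottom + 1) 1).map (fun i => (i, bottom))
    ++ (PySem.List.pyRange (bottom - 1) (top - 1) (-1)).map (fun j => (bottom, j))
    ++ (PySem.List.pyRange (bottom - 1) top (-1)).map (fun i => (i, top))

def writeBack (res : List (List Int)) (pairs : List ((Int × Int) × Int)) : List (List Int) :=
  pairs.foldl (fun m p => pvSetCell m p.1.1 p.1.2 p.2) res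

def ringLoop (param : List (List Int)) (shifts : Int) (res : List (List Int)) (top bottom : Int) :
    List (List Int) :=
  if _h : top ≤ bottom then
    let coords := ringCoords top bottom
    let ring := coords.map (fun c => pvCell param c.1 c.2)
    let k := PySem.Int.mod (-shifts) (PySem.List.len ring)
    let rotated := PySem.List.slice ring (some k) none ++ PySem.List.slice ring none (some k)
    ringLoop param shifts (writeBack res (coords.zip rotated)) (top + 1) (bottom - 1)
  else res
termination_by (bottom + 1 - top).toNat
decreasing_by omega

-- ---- A's cursor walk produces exactly ringCoords (machinery for turn_loop = ringLoop) ----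
def iterPos (s e : Int) (p : Int × Int) : Nat → Int × Int
  | 0 => p
  | n + 1 => iterPos s e (pvStep s e p.1 p.2) n

def walkPos (s e : Int) (p : Int × Int) : Nat → List (Int × Int)
  | 0 => []
  | n + 1 => p :: walkPos s e (pvStep s e p.1 p.2) n

lemma walkPos_split (s e : Int) (a : Nat) : ∀ (b : Nat) (p : Int × Int),
    walkPos s e p (a + b) = walkPos s e p a ++ walkPos s e (iterPos s e p a) b := by
  induction a with
  | zero => intro b p; simp [walkPos, iterPos]
  | succ a ih =>
    intro b p
    rw [Nat.succ_add]
    simp only [walkPos, iterPos]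
    rw [ih]
    simp [List.cons_append]

lemma phase_top (s e : Int) : ∀ (k : Nat) (y : Int), y + k ≤ e →
    walkPos s e (s, y) k = (PySem.List.pyRange y (y + k) 1).map (fun j => (s, j)) ∧
    iterPos s e (s, y) k = (s, y + k) := by
  intro k
  induction k with
  | zero =>
    intro y _
    simp [walkPos, iterPos, PySem.List.pyRange_one_eq_nil (le_refl y)]
  | succ k ih =>
    intro y hy
    have hylt : y < e := by omega
    have hstep : pvStep s e s y = (s, y + 1) := by simp [pvStep, hylt]
    have h1 := ih (y + 1) (by push_cast at hy ⊢; omega)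
    have hr : PySem.List.pyRange y (y + ((k:Int) + 1)) 1 =
        y :: PySem.List.pyRange (y + 1) (y + 1 + (k:Int)) 1 := by
      rw [PySem.List.pyRange_one_cons (by omega)]
      congr 1
      ring_nf
    constructor
    · show (s, y) :: walkPos s e (pvStep s e s y) k = _
      rw [hstep, h1.1]
      push_cast
      rw [hr]
      simp
    · show iterPos s e (pvStep s e s y) k = _
      rw [hstep, h1.2]
      congr 1
      push_cast; omega

lemma phase_right (s e : Int) : ∀ (k : Nat) (x : Int), x + k ≤ e →
    walkPos s e (x, e) k = (PySem.List.pyRange x (x + k) 1).map (fun i => (i, e)) ∧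
    iterPos s e (x, e) k = (x + k, e) := by
  intro k
  induction k with
  | zero =>
    intro x _
    simp [walkPos, iterPos, PySem.List.pyRange_one_eq_nil (le_refl x)]
  | succ k ih =>
    intro x hx
    have hxlt : x < e := by omega
    have hstep : pvStep s e x e = (x + 1, e) := by simp [pvStep, hxlt]
    have h1 := ih (x + 1) (by push_cast at hx ⊢; omega)
    have hr : PySem.List.pyRange x (x + ((k:Int) + 1)) 1 =
        x :: PySem.List.pyRange (x + 1) (x + 1 + (k:Int)) 1 := by
      rw [PySem.List.pyRange_one_cons (by omega)]
      congr 1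
      ring_nf
    constructor
    · show (x, e) :: walkPos s e (pvStep s e x e) k = _
      rw [hstep, h1.1]
      push_cast
      rw [hr]
      simp
    · show iterPos s e (pvStep s e x e) k = _
      rw [hstep, h1.2]
      congr 1
      push_cast; omega

lemma phase_bottom (s e : Int) (hse : s < e) : ∀ (k : Nat) (y : Int), s + k ≤ y → y ≤ e →
    walkPos s e (e, y) k = (PySem.List.pyRange y (y - k) (-1)).map (fun j => (e, j)) ∧
    iterPos s e (e, y) k = (e, y - k) := by
  intro k
  induction k with
  | zero =>
    intro y _ _
    simp [walkPos, iterPos]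
  | succ k ih =>
    intro y hy hye
    have hsy : s < y := by omega
    have hstep : pvStep s e e y = (e, y - 1) := by
      simp [pvStep, hse.ne', hsy]
    have h1 := ih (y - 1) (by push_cast at hy ⊢; omega) (by omega)
    have hr : PySem.List.pyRange y (y - ((k:Int) + 1)) (-1) =
        y :: PySem.List.pyRange (y - 1) (y - 1 - (k:Int)) (-1) := by
      rw [PySem.List.pyRange_neg_one_cons (by omega)]
      congr 1
      ring_nf
    constructor
    · show (e, y) :: walkPos s e (pvStep s e e y) k = _
      rw [hstep, h1.1]
      push_cast
      rw [hr]
      simp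
    · show iterPos s e (pvStep s e e y) k = _
      rw [hstep, h1.2]
      congr 1
      push_cast; omega

lemma phase_left (s e : Int) (hse : s < e) : ∀ (k : Nat) (x : Int), s + k ≤ x → x ≤ e →
    walkPos s e (x, s) k = (PySem.List.pyRange x (x - k) (-1)).map (fun i => (i, s)) ∧
    iterPos s e (x, s) k = (x - k, s) := by
  intro k
  induction k with
  | zero =>
    intro x _ _
    simp [walkPos, iterPos]
  | succ k ih =>
    intro x hx hxe
    have hsx : s < x := by omega
    have hstep : pvStep s e x s = (x - 1, s) := by
      simp [pvStep, hsx.ne', hse.ne, hsx]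
    have h1 := ih (x - 1) (by push_cast at hx ⊢; omega) (by omega)
    have hr : PySem.List.pyRange x (x - ((k:Int) + 1)) (-1) =
        x :: PySem.List.pyRange (x - 1) (x - 1 - (k:Int)) (-1) := by
      rw [PySem.List.pyRange_neg_one_cons (by omega)]
      congr 1
      ring_nf
    constructor
    · show (x, s) :: walkPos s e (pvStep s e x s) k = _
      rw [hstep, h1.1]
      push_cast
      rw [hr]
      simp
    · show iterPos s e (pvStep s e x s) k = _
      rw [hstep, h1.2]
      congr 1
      push_cast; omega

lemma pyRange_neg_one_append (a b : Int) (h : b ≤ a) :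
    PySem.List.pyRange a (b - 1) (-1) = PySem.List.pyRange a b (-1) ++ [b] := by
  have hb : b - 1 + 1 = b := by omega
  rw [PySem.List.pyRange_neg_one_eq_reverse, hb, PySem.List.pyRange_one_cons (by omega),
    List.reverse_cons, PySem.List.pyRange_neg_one_eq_reverse]

lemma ringCoords_length (s e : Int) (hse : s < e) :
    (ringCoords s e).length = 4 * (e - s).toNat := by
  rw [ringCoords, if_neg hse.ne]
  simp only [List.length_append, List.length_map, PySem.List.length_pyRange_one,
    PySem.List.length_pyRange_neg_one]
  omega

lemma walk_ring (s e : Int) (hse : s < e) :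
    walkPos s e (s, s) (4 * (e - s).toNat) = ringCoords s e := by
  set t := (e - s).toNat with ht
  have htc : (t : Int) = e - s := by omega
  have h4 : 4 * t = t + (t + (t + t)) := by omega
  have h1 := phase_top s e t s (by omega)
  have h2 := phase_right s e t s (by omega)
  have h3 := phase_bottom s e hse t e (by omega) le_rfl
  have h5 := phase_left s e hse t e (by omega) le_rfl
  have hse' : s + (t : Int) = e := by omega
  have hes : e - (t : Int) = s := by omega
  rw [h4, walkPos_split, walkPos_split, walkPos_split,
    h1.1, h1.2, hse', h2.1, h2.2, hse', h3.1, h3.2, hes, h5.1, hes]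
  rw [ringCoords, if_neg hse.ne]
  rw [PySem.List.pyRange_one_succ_right (by omega : s ≤ e),
      PySem.List.pyRange_one_succ_right (by omega : s + 1 ≤ e),
      pyRange_neg_one_append (e - 1) s (by omega),
      PySem.List.pyRange_one_cons (by omega : s < e),
      PySem.List.pyRange_neg_one_cons (by omega : s < e)]
  simp [List.append_assoc]

lemma bsq_go_eq (mtx : List (List Int)) (s e : Int) : ∀ (n : Nat) (acc : List Int) (x y : Int),
    bsq_go mtx s e n acc x y = acc ++ (walkPos s e (x, y) n).map (fun c => pvCell mtx c.1 c.2) := by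
  intro n
  induction n with
  | zero => intro acc x y; simp [bsq_go, walkPos]
  | succ n ih => intro acc x y; simp [bsq_go, walkPos, ih]

lemma bm_go_eq (s e : Int) : ∀ (lst : List Int) (m : List (List Int)) (x y : Int),
    bm_go s e lst m x y = writeBack m ((walkPos s e (x, y) lst.length).zip lst) := by
  intro lst
  induction lst with
  | nil => intro m x y; simp [bm_go, walkPos, writeBack]
  | cons v vs ih => intro m x y; simp [bm_go, walkPos, writeBack, ih]

lemma ringCoords_walk (s e : Int) (hse : s ≤ e) (k : Nat) (hk : k = (ringCoords s e).length) :
    walkPos s e (s, s) k = ringCoords s e := by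
  rcases eq_or_lt_of_le hse with h | h
  · subst h
    rw [hk, ringCoords, if_pos rfl]
    simp [walkPos]
  · rw [hk, ringCoords_length s e h]
    exact walk_ring s e h

lemma size_toNat (s e : Int) (hse : s ≤ e) :
    (if e - s + 1 = 1 then (1:Int) else (e - s + 1) * 4 - 4).toNat = (ringCoords s e).length := by
  rcases eq_or_lt_of_le hse with h | h
  · rw [if_pos (by omega), ringCoords, if_pos h]; simp
  · rw [if_neg (by omega), ringCoords_length s e h]; omega

lemma layer_read (param : List (List Int)) (s e : Int) (hse : s ≤ e) :
    build_squence param s s s e (if e - s + 1 = 1 then 1 else (e - s + 1) * 4 - 4) =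
    (ringCoords s e).map (fun c => pvCell param c.1 c.2) := by
  rw [build_squence, bsq_go_eq, size_toNat s e hse,
    ringCoords_walk s e hse _ rfl, List.nil_append]

lemma layer_write (m : List (List Int)) (lst : List Int) (s e : Int) (hse : s ≤ e)
    (hlen : lst.length = (ringCoords s e).length) :
    build_matrix m lst s s s e = writeBack m ((ringCoords s e).zip lst) := by
  rw [build_matrix, bm_go_eq, ringCoords_walk s e hse _ hlen]

lemma shift_length (ring : List Int) (k : Int) (h0 : 0 ≤ k) (h1 : k ≤ ring.length) :
    (PySem.List.slice ring (some k) none ++ PySem.List.slice ring none (some k)).length =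
    ring.length := by
  rw [PySem.List.slice_from ring h0, PySem.List.slice_to ring h0]
  simp
  omega

lemma loops_eq (param : List (List Int)) (shifts : Int) : ∀ (k : Nat) (s e : Int)
    (m : List (List Int)), (e + 1 - s).toNat = k →
    turn_loop param shifts m (e - s + 1) s s s e = ringLoop param shifts m s e := by
  intro k
  induction k using Nat.strong_induction_on with
  | _ k IH =>
    intro s e m hk
    rw [turn_loop, ringLoop]
    by_cases hse : s ≤ e
    · rw [dif_pos (by omega : e - s + 1 > 0), dif_pos hse]
      simp only []
      have hread := layer_read param s e hse
      set ring := (ringCoords s e).map (fun c => pvCell param c.1 c.2) with hring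
      have hrlen : (ring.length : Int) = (ringCoords s e).length := by simp [hring]
      have hpos : (0:Int) < ring.length := by
        have : (ringCoords s e).length > 0 := by
          rcases eq_or_lt_of_le hse with h | h
          · rw [ringCoords, if_pos h]; simp
          · rw [ringCoords_length s e h]; omega
        simp [hring]; omega
      have hkmod0 : 0 ≤ PySem.Int.mod (-shifts) (PySem.List.len ring) :=
        PySem.Int.mod_nonneg _ (by simpa [PySem.List.len_eq] using hpos)
      have hkmod1 : PySem.Int.mod (-shifts) (PySem.List.len ring) ≤ ring.length := by
        have := PySem.Int.mod_lt (-shifts) (b := PySem.List.len ring)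
          (by simpa [PySem.List.len_eq] using hpos)
        simp [PySem.List.len_eq] at this ⊢
        omega
      have hshift : shift_squence (build_squence param s s s e
          (if e - s + 1 = 1 then 1 else (e - s + 1) * 4 - 4)) (shifts * -1) =
          PySem.List.slice ring (some (PySem.Int.mod (-shifts) (PySem.List.len ring))) none ++
          PySem.List.slice ring none (some (PySem.Int.mod (-shifts) (PySem.List.len ring))) := by
        rw [shift_squence, hread, mul_neg_one]
      have hlen : (PySem.List.slice ring (some (PySem.Int.mod (-shifts) (PySem.List.len ring))) none ++
          PySem.List.slice ring none (some (PySem.Int.mod (-shifts) (PySem.List.len ring)))).length =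
          (ringCoords s e).length := by
        rw [shift_length ring _ hkmod0 hkmod1]
        simp [hring]
      rw [hshift, layer_write m _ s e hse hlen]
      have harg : e - s + 1 - 2 = (e - 1) - (s + 1) + 1 := by omega
      rw [harg]
      exact IH ((e - 1) + 1 - (s + 1)).toNat (by omega) (s + 1) (e - 1) _ rfl
    · rw [dif_neg (by omega : ¬ e - s + 1 > 0), dif_neg hse]

lemma turn_array_eq_ringLoop (param : List (List Int)) (shifts : Int) :
    turn_array param shifts = ringLoop param shifts
      ((PySem.List.pyRange 0 (PySem.List.len param) 1).map
        (fun _ => (PySem.List.pyRange 0 (PySem.List.len param) 1).map (fun _ => (0:Int))))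
      0 (PySem.List.len param - 1) := by
  show turn_loop param shifts _ (PySem.List.len param) 0 0 0 (PySem.List.len param - 1) = _
  have h := loops_eq param shifts ((PySem.List.len param - 1) + 1 - 0).toNat 0
    (PySem.List.len param - 1)
    ((PySem.List.pyRange 0 (PySem.List.len param) 1).map
      (fun _ => (PySem.List.pyRange 0 (PySem.List.len param) 1).map (fun _ => (0:Int)))) rfl
  have harg : PySem.List.len param - 1 - 0 + 1 = PySem.List.len param := by omega
  rw [harg] at h
  exact h

-- ---- NEW HALF: the ring loop computes the per-cell closed form ----

-- shape of an n×n matrix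
def Shape (m : List (List Int)) (n : Int) : Prop :=
  (m.length : Int) = n ∧ ∀ r ∈ m, (r.length : Int) = n

lemma mapRange_add (f : Nat → Int × Int) (a b : Nat) :
    (List.range (a + b)).map f
      = (List.range a).map f ++ (List.range b).map (fun (p : Nat) => f (a + p)) := by
  rw [List.range_add, List.map_append, List.map_map]
  rfl

lemma pyRangeMap (g : Int → Int × Int) (a b : Int) (n : Nat) (h : b = a + n) :
    (PySem.List.pyRange a b 1).map g = (List.range n).map (fun (p : Nat) => g (a + (p : Int))) := by
  subst h
  rw [PySem.List.pyRange_one, List.map_map]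
  have : (a + (n:Int) - a).toNat = n := by omega
  rw [this]
  rfl

lemma pyRangeMapDown (g : Int → Int × Int) (a b : Int) (n : Nat) (h : b = a - n) :
    (PySem.List.pyRange a b (-1)).map g = (List.range n).map (fun (p : Nat) => g (a - (p : Int))) := by
  subst h
  rw [PySem.List.pyRange_neg_one, List.map_map]
  have : (a - (a - (n:Int))).toNat = n := by omega
  rw [this]
  rfl

lemma ringCoords_repr (s e : Int) (hse : s < e) :
    ringCoords s e = (List.range (4 * (e - s).toNat)).map
      (fun (p : Nat) => coordOf s e (e - s) (p : Int)) := by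
  set t := (e - s).toNat with ht
  rw [show 4 * t = (t+1) + (t + (t + (t-1))) from by omega,
      mapRange_add (fun (p : Nat) => coordOf s e (e - s) (p : Int)) (t+1) (t + (t + (t-1))),
      mapRange_add (fun (p : Nat) => coordOf s e (e - s) ((t+1) + p : Nat)) t (t + (t-1)),
      mapRange_add (fun (p : Nat) => coordOf s e (e - s) ((t+1) + (t + p) : Nat)) t (t-1)]
  rw [ringCoords, if_neg hse.ne]
  rw [pyRangeMap (fun j => (s, j)) s (e + 1) (t+1) (by push_cast; omega),
      pyRangeMap (fun i => (i, e)) (s+1) (e+1) t (by push_cast; omega),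
      pyRangeMapDown (fun j => (e, j)) (e-1) (s-1) t (by push_cast; omega),
      pyRangeMapDown (fun i => (i, s)) (e-1) s (t-1) (by push_cast; omega)]
  rw [List.append_assoc, List.append_assoc]
  congr 1
  · apply List.map_congr_left
    intro p hp
    simp only [List.mem_range] at hp
    simp only [coordOf]
    rw [if_pos (by push_cast; omega)]
  congr 1
  · apply List.map_congr_left
    intro p hp
    simp only [List.mem_range] at hp
    simp only [coordOf]
    rw [if_neg (by push_cast; omega), if_pos (by push_cast; omega)]
    simp only [Prod.mk.injEq]
    constructor <;> push_cast <;> omega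
  congr 1
  · apply List.map_congr_left
    intro p hp
    simp only [List.mem_range] at hp
    simp only [coordOf]
    rw [if_neg (by push_cast; omega), if_neg (by push_cast; omega), if_pos (by push_cast; omega)]
    simp only [Prod.mk.injEq]
    constructor <;> push_cast <;> omega
  · apply List.map_congr_left
    intro p hp
    simp only [List.mem_range] at hp
    simp only [coordOf]
    rw [if_neg (by push_cast; omega), if_neg (by push_cast; omega), if_neg (by push_cast; omega)]
    simp only [Prod.mk.injEq]
    constructor <;> push_cast <;> omega

lemma posOf_coordOf (s e : Int) (hse : s < e) (q : Int) (h0 : 0 ≤ q) (h1 : q < 4 * (e - s)) :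
    posOf s e (e - s) (coordOf s e (e - s) q).1 (coordOf s e (e - s) q).2 = q := by
  unfold coordOf posOf
  split_ifs <;> simp_all <;> omega

lemma coordOf_posOf (s e i j : Int) (hse : s < e)
    (hb : s ≤ i ∧ i ≤ e ∧ s ≤ j ∧ j ≤ e ∧ (i = s ∨ i = e ∨ j = s ∨ j = e)) :
    0 ≤ posOf s e (e - s) i j ∧ posOf s e (e - s) i j < 4 * (e - s) ∧
    coordOf s e (e - s) (posOf s e (e - s) i j) = (i, j) := by
  unfold posOf coordOf
  split_ifs <;> simp_all [Prod.ext_iff] <;> omega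

lemma coordOf_bound (s e : Int) (hse : s < e) (q : Int) (h0 : 0 ≤ q) (h1 : q < 4 * (e - s)) :
    s ≤ (coordOf s e (e - s) q).1 ∧ (coordOf s e (e - s) q).1 ≤ e ∧
    s ≤ (coordOf s e (e - s) q).2 ∧ (coordOf s e (e - s) q).2 ≤ e ∧
    ((coordOf s e (e - s) q).1 = s ∨ (coordOf s e (e - s) q).1 = e ∨
     (coordOf s e (e - s) q).2 = s ∨ (coordOf s e (e - s) q).2 = e) := by
  unfold coordOf
  split_ifs <;> simp_all <;> omega

lemma ringCoords_nodup (s e : Int) (hse : s ≤ e) : (ringCoords s e).Nodup := by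
  rcases eq_or_lt_of_le hse with h | h
  · rw [ringCoords, if_pos h]
    simp
  · rw [ringCoords_repr s e h]
    apply List.Nodup.map_on _ (List.nodup_range)
    intro p hp q hq hpq
    simp only [List.mem_range] at hp hq
    have h1 := posOf_coordOf s e h p (by omega) (by push_cast; omega)
    have h2 := posOf_coordOf s e h q (by omega) (by push_cast; omega)
    rw [hpq] at h1
    omega

lemma mem_ringCoords (s e : Int) (hse : s ≤ e) (c : Int × Int) (hc : c ∈ ringCoords s e) :
    s ≤ c.1 ∧ c.1 ≤ e ∧ s ≤ c.2 ∧ c.2 ≤ e ∧ (c.1 = s ∨ c.1 = e ∨ c.2 = s ∨ c.2 = e) := by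
  rcases eq_or_lt_of_le hse with h | h
  · rw [ringCoords, if_pos h] at hc
    simp at hc
    subst hc
    simp_all
  · rw [ringCoords_repr s e h] at hc
    simp only [List.mem_map, List.mem_range] at hc
    obtain ⟨p, hp, hcp⟩ := hc
    subst hcp
    exact coordOf_bound s e h p (by omega) (by push_cast; omega)

-- reading/writing a cell of a well-shaped matrix
lemma cell_setCell (m : List (List Int)) (n x y v i j : Int) (hm : Shape m n)
    (hx : 0 ≤ x ∧ x < n) (hy : 0 ≤ y ∧ y < n) (hi : 0 ≤ i ∧ i < n) (hj : 0 ≤ j ∧ j < n) :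
    pvCell (pvSetCell m x y v) i j = if i = x ∧ j = y then v else pvCell m i j := by
  obtain ⟨hlen, hrows⟩ := hm
  have hxlt : x.toNat < m.length := by omega
  have hilt : i.toNat < m.length := by omega
  have hrow : PySem.List.pyGetD m x [] = m[x.toNat] :=
    PySem.List.pyGetD_eq_getElem m [] hx.1 (by omega)
  have hrowlen : ((m[x.toNat] : List Int).length : Int) = n := hrows _ (List.getElem_mem _)
  have hirow : PySem.List.pyGetD m i [] = m[i.toNat] :=
    PySem.List.pyGetD_eq_getElem m [] hi.1 (by omega)
  have hirowlen : ((m[i.toNat] : List Int).length : Int) = n := hrows _ (List.getElem_mem _)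
  unfold pvSetCell pvCell
  rw [hrow, PySem.List.pySetD_of_nonneg _ _ hx.1, PySem.List.pySetD_of_nonneg _ _ hy.1]
  have hset : PySem.List.pyGetD (m.set x.toNat (m[x.toNat].set y.toNat v)) i [] =
      (m.set x.toNat (m[x.toNat].set y.toNat v))[i.toNat]'(by rw [List.length_set]; omega) := by
    apply PySem.List.pyGetD_eq_getElem _ _ hi.1
    rw [List.length_set]; omega
  rw [hset, List.getElem_set]
  by_cases hix : x.toNat = i.toNat
  · rw [if_pos hix]
    have hij : i = x := by omega
    rw [PySem.List.pyGetD_eq_getElem _ _ hj.1 (by rw [List.length_set]; omega), List.getElem_set]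
    by_cases hjy : y.toNat = j.toNat
    · rw [if_pos hjy, if_pos ⟨hij, by omega⟩]
    · rw [if_neg hjy, if_neg (by intro h; exact hjy (by omega))]
      rw [hirow, PySem.List.pyGetD_eq_getElem _ _ hj.1 (by omega)]
      simp only [hix]
  · rw [if_neg hix, if_neg (by intro h; exact hix (by omega))]
    rw [hirow]

lemma shape_setCell (m : List (List Int)) (n x y v : Int) (hm : Shape m n)
    (hx : 0 ≤ x ∧ x < n) : Shape (pvSetCell m x y v) n := by
  obtain ⟨hlen, hrows⟩ := hm
  have hrow : PySem.List.pyGetD m x [] = m[x.toNat]'(by omega) :=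
    PySem.List.pyGetD_eq_getElem m [] hx.1 (by omega)
  unfold pvSetCell
  rw [hrow, PySem.List.pySetD_of_nonneg _ _ hx.1]
  constructor
  · simp [hlen]
  · intro r hr
    rcases List.mem_or_eq_of_mem_set hr with h | h
    · exact hrows r h
    · subst h
      rw [PySem.List.length_pySetD]
      exact hrows _ (List.getElem_mem _)

lemma lookup_assoc_none (ps : List ((Int × Int) × Int)) :
    ∀ c, c ∉ ps.map Prod.fst → ps.lookup c = none := by
  induction ps with
  | nil => intro c _; simp
  | cons a ps ih =>
    intro c hc
    simp only [List.map_cons, List.mem_cons, not_or] at hc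
    rw [show (a : (Int × Int) × Int) = (a.1, a.2) from rfl, List.lookup_cons,
      show (c == a.1) = false from beq_eq_false_iff_ne.mpr hc.1]
    exact ih c hc.2

lemma shape_writeBack (pairs : List ((Int × Int) × Int)) : ∀ (m : List (List Int)) (n : Int),
    Shape m n → (∀ c ∈ pairs, 0 ≤ c.1.1 ∧ c.1.1 < n) → Shape (writeBack m pairs) n := by
  induction pairs with
  | nil => intro m n hm _; exact hm
  | cons a ps ih =>
    intro m n hm hr
    show Shape (writeBack (pvSetCell m a.1.1 a.1.2 a.2) ps) n
    exact ih _ n (shape_setCell m n _ _ _ hm (hr a (by simp)))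
      (fun c hc => hr c (by simp [hc]))

lemma cell_writeBack (n : Int) (pairs : List ((Int × Int) × Int)) :
    ∀ (m : List (List Int)), Shape m n →
    (pairs.map Prod.fst).Nodup →
    (∀ c ∈ pairs, 0 ≤ c.1.1 ∧ c.1.1 < n ∧ 0 ≤ c.1.2 ∧ c.1.2 < n) →
    ∀ i j : Int, 0 ≤ i → i < n → 0 ≤ j → j < n →
    pvCell (writeBack m pairs) i j =
      match pairs.lookup (i, j) with
      | some v => v
      | none => pvCell m i j := by
  induction pairs with
  | nil => intro m _ _ _ i j _ _ _ _; simp [writeBack]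
  | cons a ps ih =>
    intro m hm hnd hr i j hi0 hi1 hj0 hj1
    have ha := hr a (by simp)
    rw [List.map_cons] at hnd
    obtain ⟨hnd1, hnd2⟩ := List.nodup_cons.mp hnd
    have hW : writeBack m (a :: ps) = writeBack (pvSetCell m a.1.1 a.1.2 a.2) ps := rfl
    rw [hW, ih _ (shape_setCell m n _ _ _ hm ⟨ha.1, ha.2.1⟩)
      hnd2
      (fun c hc => hr c (by simp [hc])) i j hi0 hi1 hj0 hj1]
    rw [show (a : (Int × Int) × Int) = (a.1, a.2) from rfl, List.lookup_cons]
    by_cases hc : (i, j) = a.1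
    · rw [show ((i, j) == a.1) = true from beq_iff_eq.mpr hc]
      rw [lookup_assoc_none ps (i, j) (by rw [hc]; exact hnd1)]
      simp only []
      rw [cell_setCell m n a.1.1 a.1.2 a.2 i j hm ⟨ha.1, ha.2.1⟩ ⟨ha.2.2.1, ha.2.2.2⟩
        ⟨hi0, hi1⟩ ⟨hj0, hj1⟩]
      rw [if_pos (by rw [Prod.ext_iff] at hc; exact hc)]
    · rw [show ((i, j) == a.1) = false from beq_eq_false_iff_ne.mpr hc]
      cases hps : ps.lookup (i, j) with
      | some w => simp
      | none =>
        simp only []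
        rw [cell_setCell m n a.1.1 a.1.2 a.2 i j hm ⟨ha.1, ha.2.1⟩ ⟨ha.2.2.1, ha.2.2.2⟩
          ⟨hi0, hi1⟩ ⟨hj0, hj1⟩]
        rw [if_neg (by intro h; exact hc (by rw [Prod.ext_iff]; exact h))]

lemma lookup_zip_get {α β : Type} [BEq α] [LawfulBEq α] (l : List α) :
    ∀ (r : List β) (p : Nat) (c : α), l.Nodup → l[p]? = some c →
    (l.zip r).lookup c = r[p]? := by
  induction l with
  | nil => intro r p c _ h; simp at h
  | cons a l ih =>
    intro r p c hnd hp
    cases r with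
    | nil => simp
    | cons b r =>
      cases p with
      | zero =>
        simp at hp; subst hp
        simp
      | succ p =>
        simp at hp
        have hca : c ≠ a := by
          intro h; subst h
          exact (List.nodup_cons.mp hnd).1 (by exact List.mem_of_getElem? hp)
        rw [List.zip_cons_cons, List.lookup_cons,
          show (c == a) = false from beq_eq_false_iff_ne.mpr hca]
        rw [ih r p c (List.nodup_cons.mp hnd).2 hp]
        simp

lemma lookup_zip_none {α β : Type} [BEq α] [LawfulBEq α] (l : List α) :
    ∀ (r : List β) (c : α), c ∉ l → (l.zip r).lookup c = none := by
  induction l with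
  | nil => intro r c _; simp
  | cons a l ih =>
    intro r c hc
    cases r with
    | nil => simp
    | cons b r =>
      rw [List.zip_cons_cons, List.lookup_cons,
        show (c == a) = false from beq_eq_false_iff_ne.mpr (by simp at hc; exact hc.1)]
      exact ih r c (by simp at hc; exact fun h => hc.2 h)

lemma rot_getElem {α : Type} (l : List α) (k p : Nat) (hk : k ≤ l.length) (hp : p < l.length) :
    (l.drop k ++ l.take k)[p]? = l[(p + k) % l.length]? := by
  by_cases h : p < l.length - k
  · rw [List.getElem?_append_left (by simp; omega)]
    rw [Nat.mod_eq_of_lt (by omega)]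
    simp [List.getElem?_drop]
    congr 1
    omega
  · rw [List.getElem?_append_right (by simp; omega)]
    have hmod : (p + k) % l.length = p + k - l.length := by
      rw [Nat.mod_eq_sub_mod (by omega), Nat.mod_eq_of_lt (by omega)]
    rw [hmod]
    simp only [List.length_drop]
    rw [List.getElem?_take_of_lt (by omega)]
    congr 1
    omega

-- the main induction over layers
lemma ringLoop_entry (param : List (List Int)) (shifts : Int) :
    ∀ (kf : Nat) (s e : Int) (m : List (List Int)), (e + 1 - s).toNat = kf →
    0 ≤ s → s + e = PySem.List.len param - 1 → Shape m (PySem.List.len param) →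
    Shape (ringLoop param shifts m s e) (PySem.List.len param) ∧
    ∀ i j : Int, 0 ≤ i → i < PySem.List.len param → 0 ≤ j → j < PySem.List.len param →
      pvCell (ringLoop param shifts m s e) i j =
        if s ≤ i ∧ i ≤ e ∧ s ≤ j ∧ j ≤ e then cellValue param shifts (PySem.List.len param) i j
        else pvCell m i j := by
  intro kf
  induction kf using Nat.strong_induction_on with
  | _ kf IH =>
    intro s e m hk h0s hsum hm
    set N := PySem.List.len param with hN
    rw [ringLoop]
    by_cases hse : s ≤ e
    · rw [dif_pos hse]
      simp only []
      set coords := ringCoords s e with hcoords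
      set ring := coords.map (fun c => pvCell param c.1 c.2) with hring
      have hclen : ring.length = coords.length := by rw [hring]; simp
      have hcpos : 0 < coords.length := by
        rcases eq_or_lt_of_le hse with h | h
        · rw [hcoords, ringCoords, if_pos h]; simp
        · rw [hcoords, ringCoords_length s e h]; omega
      have hlenring : PySem.List.len ring = (coords.length : Int) := by
        rw [PySem.List.len_eq, hclen]
      set k := PySem.Int.mod (-shifts) (PySem.List.len ring) with hkdef
      have hk0 : 0 ≤ k :=
        PySem.Int.mod_nonneg _ (by rw [hlenring]; exact_mod_cast hcpos)
      have hk1 : k < (coords.length : Int) := by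
        have h2 : k < PySem.List.len ring := PySem.Int.mod_lt (-shifts)
          (by rw [hlenring]; exact_mod_cast hcpos)
        exact lt_of_lt_of_eq h2 hlenring
      have hrot : PySem.List.slice ring (some k) none ++ PySem.List.slice ring none (some k)
          = ring.drop k.toNat ++ ring.take k.toNat := by
        rw [PySem.List.slice_from ring hk0, PySem.List.slice_to ring hk0]
      have hrotlen :
          (PySem.List.slice ring (some k) none ++ PySem.List.slice ring none (some k)).length
            = coords.length := by
        rw [hrot]
        simp
        omega
      set pairs := coords.zip
        (PySem.List.slice ring (some k) none ++ PySem.List.slice ring none (some k)) with hpairs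
      have hfst : pairs.map Prod.fst = coords := List.map_fst_zip (by omega)
      have hnodupfst : (pairs.map Prod.fst).Nodup := by
        rw [hfst]
        exact ringCoords_nodup s e hse
      have hrangec : ∀ c ∈ coords, 0 ≤ c.1 ∧ c.1 < N ∧ 0 ≤ c.2 ∧ c.2 < N := by
        intro c hc
        have hb := mem_ringCoords s e hse c hc
        have hNlen : (param.length : Int) = N := by rw [hN, PySem.List.len_eq]
        omega
      have hrange : ∀ c ∈ pairs, 0 ≤ c.1.1 ∧ c.1.1 < N ∧ 0 ≤ c.1.2 ∧ c.1.2 < N := by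
        intro c hc
        refine hrangec c.1 ?_
        rw [← hfst]
        exact List.mem_map_of_mem hc
      set W := writeBack m pairs with hWdef
      have hWshape : Shape W N :=
        shape_writeBack pairs m N hm (fun c hc => ⟨(hrange c hc).1, (hrange c hc).2.1⟩)
      have hrec := IH ((e - 1) + 1 - (s + 1)).toNat (by omega) (s + 1) (e - 1) W rfl
        (by omega) (by omega) hWshape
      refine ⟨hrec.1, ?_⟩
      intro i j hi0 hi1 hj0 hj1
      rw [hrec.2 i j hi0 hi1 hj0 hj1]
      by_cases hin : s + 1 ≤ i ∧ i ≤ e - 1 ∧ s + 1 ≤ j ∧ j ≤ e - 1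
      · rw [if_pos hin, if_pos (by omega)]
      · rw [if_neg hin]
        have hWc := cell_writeBack N pairs m hm hnodupfst hrange i j hi0 hi1 hj0 hj1
        by_cases hbd : s ≤ i ∧ i ≤ e ∧ s ≤ j ∧ j ≤ e
        · rw [if_pos hbd]
          rcases eq_or_lt_of_le hse with hEq | hLt
          · -- single center cell: s = e, i = j = s
            have hi : i = s := by omega
            have hj : j = s := by omega
            have hc1 : coords = [(s, s)] := by rw [hcoords, ringCoords, if_pos hEq]
            have hkz : k = 0 := by
              have : coords.length = 1 := by rw [hc1]; rfl
              omega
            have hr1 : ring = [pvCell param s s] := by rw [hring, hc1]; rfl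
            have hpair1 : pairs = [((s, s), pvCell param s s)] := by
              rw [hpairs, hkz, hc1, hr1,
                PySem.List.slice_from _ (le_refl (0:Int)),
                PySem.List.slice_to _ (le_refl (0:Int))]
              rfl
            rw [hWc, hpair1, hi, hj]
            rw [List.lookup_cons, show (((s : Int), (s : Int)) == ((s : Int), (s : Int))) = true
              from beq_iff_eq.mpr rfl]
            simp only []
            have hLval : min (min (min s s) (N - 1 - s)) (N - 1 - s) = s := by omega
            simp only [cellValue]
            rw [hLval, if_pos (by omega : N - 1 - s - s = 0)]
          · -- s < e
            obtain ⟨hp0, hp1, hcp⟩ := coordOf_posOf s e i j hLt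
              ⟨hbd.1, hbd.2.1, hbd.2.2.1, hbd.2.2.2, by omega⟩
            set p := posOf s e (e - s) i j with hpdef
            have hlen4 : ring.length = 4 * (e - s).toNat := by
              rw [hclen, hcoords, ringCoords_length s e hLt]
            have hgetc : coords[p.toNat]? = some (i, j) := by
              rw [hcoords, ringCoords_repr s e hLt, List.getElem?_map,
                List.getElem?_range (by omega : p.toNat < 4 * (e - s).toNat)]
              simp only [Option.map_some]
              rw [show ((p.toNat : Nat) : Int) = p from by omega, hcp]
            have hlk := lookup_zip_get coords
              (PySem.List.slice ring (some k) none ++ PySem.List.slice ring none (some k))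
              p.toNat (i, j) (ringCoords_nodup s e hse) hgetc
            have hrotget :
                (PySem.List.slice ring (some k) none ++ PySem.List.slice ring none (some k))[p.toNat]?
                  = ring[(p.toNat + k.toNat) % ring.length]? := by
              rw [hrot]
              exact rot_getElem ring k.toNat p.toNat (by omega) (by omega)
            rw [hrotget] at hlk
            set q := PySem.Int.mod (p - shifts) (4 * (e - s)) with hqdef
            have hLpos : (0:Int) < 4 * (e - s) := by omega
            have hq0 : 0 ≤ q := PySem.Int.mod_nonneg _ hLpos
            have hq1 : q < 4 * (e - s) := PySem.Int.mod_lt _ hLpos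
            have hq_eq : (p.toNat + k.toNat) % ring.length = q.toNat := by
              have hqemod : q = (p - shifts) % (4 * (e - s)) := by
                rw [hqdef, PySem.Int.mod_eq_emod_of_pos hLpos]
              have hLr : PySem.List.len ring = 4 * (e - s) := by
                rw [PySem.List.len_eq, hlen4]
                push_cast
                omega
              have hkemod : k = (-shifts) % (4 * (e - s)) := by
                rw [hkdef, hLr, PySem.Int.mod_eq_emod_of_pos hLpos]
              have h1 : (((p.toNat + k.toNat) % ring.length : Nat) : Int) = q := by
                push_cast
                rw [show (p.toNat : Int) = p from by omega,
                  show (k.toNat : Int) = k from by omega,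
                  show ((ring.length : Nat) : Int) = 4 * (e - s) from by rw [hlen4]; push_cast; omega]
                rw [hqemod, hkemod]
                conv_lhs => rw [Int.add_emod]
                conv_rhs => rw [show p - shifts = p + -shifts from by ring, Int.add_emod]
                rw [Int.emod_emod_of_dvd _ (dvd_refl _)]
              omega
            rw [hq_eq] at hlk
            have hringq : ring[q.toNat]? =
                some (pvCell param (coordOf s e (e - s) q).1 (coordOf s e (e - s) q).2) := by
              rw [hring, List.getElem?_map, hcoords, ringCoords_repr s e hLt,
                List.getElem?_map, List.getElem?_range (by omega : q.toNat < 4 * (e - s).toNat)]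
              simp only [Option.map_some]
              rw [show ((q.toNat : Nat) : Int) = q from by omega]
            rw [hringq] at hlk
            rw [hWc, hpairs, hlk]
            simp only []
            have hLval : min (min (min i j) (N - 1 - i)) (N - 1 - j) = s := by
              have hNlen : (param.length : Int) = N := by rw [hN, PySem.List.len_eq]
              omega
            simp only [cellValue]
            rw [hLval, if_neg (by omega : ¬ N - 1 - s - s = 0),
              show N - 1 - s = e from by omega]
        · rw [if_neg hbd]
          have hnot : (i, j) ∉ coords := by
            intro hmem
            have hb := mem_ringCoords s e hse _ hmem
            simp only [] at hb
            omega
          rw [hWc, lookup_zip_none coords _ (i, j) hnot]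
    · rw [dif_neg hse]
      refine ⟨hm, ?_⟩
      intro i j _ _ _ _
      rw [if_neg (by omega)]

lemma turn_array_eq_alt (param : List (List Int)) (shifts : Int) :
    turn_array param shifts = turn_array_alt param shifts := by
  rw [turn_array_eq_ringLoop]
  set N := PySem.List.len param with hN
  have hN0 : 0 ≤ N := by rw [hN, PySem.List.len_eq]; positivity
  have hrowlen : ((PySem.List.pyRange 0 N 1).map (fun _ => (0:Int))).length = N.toNat := by
    rw [List.length_map, PySem.List.length_pyRange_one]
    omega
  have hshape0 : Shape ((PySem.List.pyRange 0 N 1).map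
      (fun _ => (PySem.List.pyRange 0 N 1).map (fun _ => (0:Int)))) N := by
    constructor
    · rw [List.length_map, PySem.List.length_pyRange_one]
      omega
    · intro r hr
      rw [List.mem_map] at hr
      obtain ⟨x, _, hx⟩ := hr
      rw [← hx, hrowlen]
      omega
  have hmain := ringLoop_entry param shifts (N - 1 + 1 - 0).toNat 0 (N - 1) _ rfl
    (le_refl 0) (by omega) hshape0
  show ringLoop param shifts _ 0 (N - 1)
      = (PySem.List.pyRange 0 N 1).map (fun i =>
          (PySem.List.pyRange 0 N 1).map (fun j => cellValue param shifts N i j))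
  apply List.ext_getElem
  · simp only [List.length_map, PySem.List.length_pyRange_one]
    have := hmain.1.1
    omega
  · intro a ha1 ha2
    have haN : (a : Int) < N := by
      have := hmain.1.1
      omega
    simp only [List.length_map, PySem.List.length_pyRange_one] at ha2
    rw [List.getElem_map, PySem.List.getElem_pyRange_one]
    apply List.ext_getElem
    · rw [List.length_map, PySem.List.length_pyRange_one]
      have hmem := hmain.1.2 _ (List.getElem_mem ha1)
      omega
    · intro b hb1 hb2
      have hbN : (b : Int) < N := by
        have := hmain.1.2 _ (List.getElem_mem ha1)
        omega
      rw [List.getElem_map, PySem.List.getElem_pyRange_one]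
      have hcell := hmain.2 (a : Int) (b : Int) (by positivity) haN (by positivity) hbN
      rw [if_pos (by omega)] at hcell
      have hbridge : pvCell (ringLoop param shifts ((PySem.List.pyRange 0 N 1).map
          (fun _ => (PySem.List.pyRange 0 N 1).map (fun _ => (0:Int)))) 0 (N - 1))
          (a : Int) (b : Int)
          = (ringLoop param shifts ((PySem.List.pyRange 0 N 1).map
            (fun _ => (PySem.List.pyRange 0 N 1).map (fun _ => (0:Int)))) 0 (N - 1))[a][b]'(by
              have := hmain.1.2 _ (List.getElem_mem ha1)
              omega) := by
        unfold pvCell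
        rw [PySem.List.pyGetD_natCast, PySem.List.pyGetD_natCast,
          List.getD_eq_getElem _ _ ha1, List.getD_eq_getElem _ _ hb1]
      rw [← hbridge, hcell]
      congr 1 <;> omega

-- ===== VERDICT (by name: the statement is the Claim_ definition above) =====
theorem turn_array_spec : Claim_equal_turn_array := by
  intro param shifts _ _
  unfold Spec_turn_array
  exact turn_array_eq_alt param shifts
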